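-- pv_equiv track=rewrite | github.com/Chinmayeep58/gmail-agent | job_filter.py | is_job_email
-- ===== SOURCE A (Python) =====
-- def is_job_email(subject, snippet):
--
--     text = (subject + " " + snippet).lower()
--
--     job_phrases = [
--         "thank you for applying",
--         "application received",
--         "your application has been submitted",
--         "we received your application",
--         "thanks for applying",
--         "application confirmation"
--     ]
--
--     for phrase in job_phrases:
--         if phrase in text:
--             return True
--
--     return False
-- ===== SOURCE B (Python) =====
-- JOB_PHRASES = (
--     "thank you for applying",
--     "application received",
--     "your application has been submitted",
--     "we received your application",
--     "thanks for applying",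
--     "application confirmation",
-- )
--
-- def is_job_email(subject, snippet):
--     text = (subject + " " + snippet).lower()
--     for i in range(len(text)):
--         if any(text.startswith(p, i) for p in JOB_PHRASES):
--             return True
--     return False
-- ===== Notes on version B (the rewrite author's own statement) =====
-- stated objective: alternative
-- what changed: A scans the whole text once per phrase (six separate substring searches); B makes a single left-to-right pass over the text and at each position checks whether any phrase starts there, so the text is traversed once.
import Mathlib
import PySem

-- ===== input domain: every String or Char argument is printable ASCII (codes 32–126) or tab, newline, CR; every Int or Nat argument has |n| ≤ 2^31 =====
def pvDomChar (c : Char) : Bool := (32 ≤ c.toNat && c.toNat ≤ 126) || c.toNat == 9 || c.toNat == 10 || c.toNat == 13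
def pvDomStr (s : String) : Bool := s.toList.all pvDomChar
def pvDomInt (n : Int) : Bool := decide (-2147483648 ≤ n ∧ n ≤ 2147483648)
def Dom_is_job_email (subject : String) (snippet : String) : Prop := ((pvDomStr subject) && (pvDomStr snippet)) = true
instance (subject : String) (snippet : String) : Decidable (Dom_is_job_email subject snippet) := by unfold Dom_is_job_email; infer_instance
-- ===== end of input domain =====

-- B replaces A's six separate full-text substring scans by one left-to-right pass that
-- checks at each position whether any phrase starts there (objective: alternative).

def jobPhrases : List (List Char) :=
  [ "thank you for applying".toList,
    "application received".toList,
    "your application has been submitted".toList,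
    "we received your application".toList,
    "thanks for applying".toList,
    "application confirmation".toList ]

-- ===== PORT A =====
-- A: lowercase the concatenation, then for each phrase test 'phrase in text' (early return = any).
def is_job_email (subject : String) (snippet : String) : Bool :=
  let text := PySem.Chars.lower (subject.toList ++ " ".toList ++ snippet.toList)
  jobPhrases.any (fun phrase => PySem.Chars.isIn phrase text)

-- ===== PORT B =====
-- B's loop over i in range(len(text)): recursion over the suffixes of text,
-- checking text.startswith(p, i) for each phrase at the current position.
def jobScan : List Char → Bool
  | [] => false
  | c :: rest =>
      (jobPhrases.any fun p => PySem.Chars.startswith (c :: rest) p) || jobScan rest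

def is_job_email_alt (subject : String) (snippet : String) : Bool :=
  let text := PySem.Chars.lower (subject.toList ++ " ".toList ++ snippet.toList)
  jobScan text

-- ===== PRECONDITION & SPEC =====
def Spec_is_job_email (subject : String) (snippet : String) (out : Bool) : Prop := out = is_job_email_alt subject snippet
instance (subject : String) (snippet : String) (out : Bool) : Decidable (Spec_is_job_email subject snippet out) := by unfold Spec_is_job_email; infer_instance

-- ===== CLAIM (what is proved, stated in full; the proofs are below) =====
def Claim_equal_is_job_email : Prop := ∀ (subject : String) (snippet : String), Dom_is_job_email subject snippet → Spec_is_job_email subject snippet (is_job_email subject snippet)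

-- ===== LEMMAS AND PROOFS =====

lemma any_or_split {α : Type} (l : List α) (f g : α → Bool) :
    (l.any fun a => f a || g a) = (l.any f || l.any g) := by
  induction l with
  | nil => simp
  | cons a t ih => simp [ih, Bool.or_assoc, Bool.or_left_comm]

lemma jobScan_eq_any (t : List Char) :
    jobScan t = jobPhrases.any (fun p => PySem.Chars.isIn p t) := by
  induction t with
  | nil =>
      simp only [jobScan, eq_comm (a := false), List.any_eq_false]
      intro p hp
      have hne : p ≠ [] := by
        revert hp; simp [jobPhrases]; rintro (rfl|rfl|rfl|rfl|rfl|rfl) <;> decide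
      exact Bool.eq_false_iff.mp ((PySem.Chars.isIn_eq_false_iff p []).mpr (fun h => hne (List.eq_nil_of_infix_nil h)))
  | cons c rest ih =>
      have step : ∀ p : List Char,
          PySem.Chars.isIn p (c :: rest)
            = (PySem.Chars.startswith (c :: rest) p || PySem.Chars.isIn p rest) := by
        intro p
        by_cases h : p <:+: c :: rest
        · rcases List.infix_cons_iff.mp h with hpre | hinf
          · simp [(PySem.Chars.isIn_iff_infix p (c :: rest)).mpr h,
              (PySem.Chars.startswith_iff (c :: rest) p).mpr hpre]
          · simp [(PySem.Chars.isIn_iff_infix p (c :: rest)).mpr h,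
              (PySem.Chars.isIn_iff_infix p rest).mpr hinf]
        · have h1 : PySem.Chars.startswith (c :: rest) p = false :=
            Bool.eq_false_iff.mpr (fun hs =>
              h (List.infix_cons_iff.mpr (Or.inl ((PySem.Chars.startswith_iff _ _).mp hs))))
          have h2 : PySem.Chars.isIn p rest = false :=
            (PySem.Chars.isIn_eq_false_iff p rest).mpr
              (fun hp => h (List.infix_cons_iff.mpr (Or.inr hp)))
          simp [(PySem.Chars.isIn_eq_false_iff p (c :: rest)).mpr h, h1, h2]
      simp only [jobScan, ih, step, any_or_split]

-- ===== VERDICT (by name: the statement is the Claim_ definition above) =====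
theorem is_job_email_spec : Claim_equal_is_job_email := by
  intro subject snippet _
  unfold Spec_is_job_email is_job_email is_job_email_alt
  rw [jobScan_eq_any]
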